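-- pv_equiv track=rewrite | github.com/jennhuynh02/Judge_Agent | mock_api.py | mock_gpt4o_distribution
-- ===== SOURCE A (Python) =====
-- from typing import Dict, Any, List
--
-- def mock_gpt4o_distribution(text: str) -> List[str]:
--     """Mock GPT-4o distribution analysis"""
--     text_lower = text.lower()
--
--     # Simple keyword-based distribution
--     distributions = []
--
--     if any(word in text_lower for word in ["tech", "ai", "code", "software", "startup"]):
--         distributions.append("Tech Twitter")
--     if any(word in text_lower for word in ["professional", "career", "business", "leadership"]):
--         distributions.append("LinkedIn")
--     if any(word in text_lower for word in ["meme", "funny", "lol", "reddit"]):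
--         distributions.append("Reddit")
--     if any(word in text_lower for word in ["video", "viral", "trend", "dance"]):
--         distributions.append("TikTok")
--
--     # Default if no matches
--     if not distributions:
--         distributions = ["Mainstream News", "YouTube"]
--
--     return distributions[:3]  # Max 3
-- ===== SOURCE B (Python) =====
-- KEYWORD_LABELS = [
--     ("tech", "Tech Twitter"), ("ai", "Tech Twitter"), ("code", "Tech Twitter"),
--     ("software", "Tech Twitter"), ("startup", "Tech Twitter"),
--     ("professional", "LinkedIn"), ("career", "LinkedIn"),
--     ("business", "LinkedIn"), ("leadership", "LinkedIn"),
--     ("meme", "Reddit"), ("funny", "Reddit"), ("lol", "Reddit"), ("reddit", "Reddit"),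
--     ("video", "TikTok"), ("viral", "TikTok"), ("trend", "TikTok"), ("dance", "TikTok"),
-- ]
--
-- def mock_gpt4o_distribution(text):
--     t = text.lower()
--     out = []
--     for kw, label in KEYWORD_LABELS:
--         if label not in out and kw in t:
--             out.append(label)
--     return (out or ["Mainstream News", "YouTube"])[:3]
-- ===== Notes on version B (the rewrite author's own statement) =====
-- stated objective: alternative
-- what changed: Inverts the decomposition: instead of four per-label any-of-keywords checks, B scans one flat keyword-to-label pair table in a single loop, appending a label on a substring hit and skipping labels already present in the output list.
import Mathlib
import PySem

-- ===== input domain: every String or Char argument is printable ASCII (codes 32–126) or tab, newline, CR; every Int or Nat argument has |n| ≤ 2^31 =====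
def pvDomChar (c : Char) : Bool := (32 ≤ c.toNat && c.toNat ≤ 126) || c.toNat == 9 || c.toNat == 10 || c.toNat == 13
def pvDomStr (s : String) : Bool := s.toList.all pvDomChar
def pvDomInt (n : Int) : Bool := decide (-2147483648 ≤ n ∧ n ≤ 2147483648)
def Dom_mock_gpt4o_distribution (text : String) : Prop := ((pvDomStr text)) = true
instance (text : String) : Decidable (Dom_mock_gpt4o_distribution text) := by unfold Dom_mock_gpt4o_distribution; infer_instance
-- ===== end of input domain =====

-- B replaces A's four per-label any-of-keywords blocks by a single pass over a flat keyword→label pair list with a 'label not in out' dedup (objective: alternative).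


-- ===== PORT A =====
def mock_gpt4o_distribution (text : String) : List String :=
  let text_lower := PySem.Str.lower text
  let distributions : List String := []
  let distributions := if ["tech", "ai", "code", "software", "startup"].any (fun word => PySem.Str.isIn word text_lower) then distributions ++ ["Tech Twitter"] else distributions
  let distributions := if ["professional", "career", "business", "leadership"].any (fun word => PySem.Str.isIn word text_lower) then distributions ++ ["LinkedIn"] else distributions
  let distributions := if ["meme", "funny", "lol", "reddit"].any (fun word => PySem.Str.isIn word text_lower) then distributions ++ ["Reddit"] else distributions
  let distributions := if ["video", "viral", "trend", "dance"].any (fun word => PySem.Str.isIn word text_lower) then distributions ++ ["TikTok"] else distributions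
  let distributions := if distributions = [] then ["Mainstream News", "YouTube"] else distributions
  PySem.List.slice distributions none (some 3)

-- ===== PORT B =====
-- B: one flat keyword→label table, scanned in a single loop with dedup (from Source B)
def pvKeywordLabels : List (String × String) :=
  [("tech", "Tech Twitter"), ("ai", "Tech Twitter"), ("code", "Tech Twitter"),
   ("software", "Tech Twitter"), ("startup", "Tech Twitter"),
   ("professional", "LinkedIn"), ("career", "LinkedIn"),
   ("business", "LinkedIn"), ("leadership", "LinkedIn"),
   ("meme", "Reddit"), ("funny", "Reddit"), ("lol", "Reddit"), ("reddit", "Reddit"),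
   ("video", "TikTok"), ("viral", "TikTok"), ("trend", "TikTok"), ("dance", "TikTok")]

def mock_gpt4o_distribution_alt (text : String) : List String :=
  let t := PySem.Str.lower text
  let out := pvKeywordLabels.foldl
    (fun out p => if !(out.contains p.2) && PySem.Str.isIn p.1 t then out ++ [p.2] else out) []
  (if out = [] then ["Mainstream News", "YouTube"] else out).take 3

-- ===== PRECONDITION & SPEC =====
def Spec_mock_gpt4o_distribution (text : String) (out : List String) : Prop := out = mock_gpt4o_distribution_alt text
instance (text : String) (out : List String) : Decidable (Spec_mock_gpt4o_distribution text out) := by unfold Spec_mock_gpt4o_distribution; infer_instance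

-- ===== CLAIM (what is proved, stated in full; the proofs are below) =====
def Claim_equal_mock_gpt4o_distribution : Prop := ∀ (text : String), Dom_mock_gpt4o_distribution text → Spec_mock_gpt4o_distribution text (mock_gpt4o_distribution text)

-- ===== LEMMAS AND PROOFS =====

-- once the label is already in the accumulator, a whole group of its keywords is skipped
theorem pv_fold_skip (t L : String) (ks : List (String × String)) (out : List String)
    (hks : ∀ p ∈ ks, p.2 = L) (h : out.contains L = true) :
    ks.foldl (fun out p => if !(out.contains p.2) && PySem.Str.isIn p.1 t then out ++ [p.2] else out) out = out := by
  induction ks with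
  | nil => rfl
  | cons p rest ih =>
    have hp : p.2 = L := hks p (List.mem_cons_self)
    simp only [List.foldl_cons, hp, h, Bool.not_true, Bool.false_and, Bool.false_eq_true, if_false]
    exact ih (fun q hq => hks q (List.mem_cons_of_mem _ hq))

-- folding one same-label group: appends the label iff some keyword of the group matches
theorem pv_fold_group (t L : String) (ks : List (String × String)) (out : List String)
    (hks : ∀ p ∈ ks, p.2 = L) (h : out.contains L = false) :
    ks.foldl (fun out p => if !(out.contains p.2) && PySem.Str.isIn p.1 t then out ++ [p.2] else out) out
      = if ks.any (fun p => PySem.Str.isIn p.1 t) then out ++ [L] else out := by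
  induction ks with
  | nil => rfl
  | cons p rest ih =>
    have hp : p.2 = L := hks p (List.mem_cons_self)
    have hrest : ∀ q ∈ rest, q.2 = L := fun q hq => hks q (List.mem_cons_of_mem _ hq)
    cases hm : PySem.Str.isIn p.1 t with
    | true =>
      have hc : (out ++ [L]).contains L = true := by simp
      simp only [List.foldl_cons, List.any_cons, hp, h, hm, Bool.not_false, Bool.true_and,
        if_true, Bool.true_or, pv_fold_skip t L rest (out ++ [L]) hrest hc]
    | false =>
      simp only [List.foldl_cons, List.any_cons, hp, h, hm, Bool.not_false, Bool.true_and,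
        Bool.false_eq_true, if_false, Bool.false_or, ih hrest]

-- ===== VERDICT (by name: the statement is the Claim_ definition above) =====
theorem mock_gpt4o_distribution_spec : Claim_equal_mock_gpt4o_distribution := by
  intro text _
  unfold Spec_mock_gpt4o_distribution mock_gpt4o_distribution mock_gpt4o_distribution_alt
  set t := PySem.Str.lower text with ht
  have hsplit : pvKeywordLabels =
      ([("tech","Tech Twitter"),("ai","Tech Twitter"),("code","Tech Twitter"),("software","Tech Twitter"),("startup","Tech Twitter")]
       ++ [("professional","LinkedIn"),("career","LinkedIn"),("business","LinkedIn"),("leadership","LinkedIn")]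
       ++ [("meme","Reddit"),("funny","Reddit"),("lol","Reddit"),("reddit","Reddit")]
       ++ [("video","TikTok"),("viral","TikTok"),("trend","TikTok"),("dance","TikTok")] : List (String × String)) := by rfl
  have e1 : (([("tech","Tech Twitter"),("ai","Tech Twitter"),("code","Tech Twitter"),("software","Tech Twitter"),("startup","Tech Twitter")] : List (String × String)).any (fun p => PySem.Str.isIn p.1 t))
      = (["tech", "ai", "code", "software", "startup"].any (fun word => PySem.Str.isIn word t)) := rfl
  have e2 : (([("professional","LinkedIn"),("career","LinkedIn"),("business","LinkedIn"),("leadership","LinkedIn")] : List (String × String)).any (fun p => PySem.Str.isIn p.1 t))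
      = (["professional", "career", "business", "leadership"].any (fun word => PySem.Str.isIn word t)) := rfl
  have e3 : (([("meme","Reddit"),("funny","Reddit"),("lol","Reddit"),("reddit","Reddit")] : List (String × String)).any (fun p => PySem.Str.isIn p.1 t))
      = (["meme", "funny", "lol", "reddit"].any (fun word => PySem.Str.isIn word t)) := rfl
  have e4 : (([("video","TikTok"),("viral","TikTok"),("trend","TikTok"),("dance","TikTok")] : List (String × String)).any (fun p => PySem.Str.isIn p.1 t))
      = (["video", "viral", "trend", "dance"].any (fun word => PySem.Str.isIn word t)) := rfl
  rw [hsplit]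
  simp only [List.foldl_append]
  rw [pv_fold_group t "Tech Twitter" _ [] (by decide) (by decide), e1]
  cases h1 : ["tech", "ai", "code", "software", "startup"].any (fun word => PySem.Str.isIn word t)
  all_goals rw [pv_fold_group t "LinkedIn" [("professional","LinkedIn"),("career","LinkedIn"),("business","LinkedIn"),("leadership","LinkedIn")] _ (by decide) (by decide), e2]
  all_goals cases h2 : ["professional", "career", "business", "leadership"].any (fun word => PySem.Str.isIn word t)
  all_goals rw [pv_fold_group t "Reddit" [("meme","Reddit"),("funny","Reddit"),("lol","Reddit"),("reddit","Reddit")] _ (by decide) (by decide), e3]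
  all_goals cases h3 : ["meme", "funny", "lol", "reddit"].any (fun word => PySem.Str.isIn word t)
  all_goals rw [pv_fold_group t "TikTok" [("video","TikTok"),("viral","TikTok"),("trend","TikTok"),("dance","TikTok")] _ (by decide) (by decide), e4]
  all_goals cases h4 : ["video", "viral", "trend", "dance"].any (fun word => PySem.Str.isIn word t)
  all_goals rfl
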